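-- pv_equiv track=rewrite | github.com/cii-zz/ImageGenderAnalyzer | main.py | _resolve_gender_conflict
-- ===== SOURCE A (Python) =====
-- def _resolve_gender_conflict(text, male_words, female_words):
--     male_count = sum(1 for word in male_words if word in text)
--     female_count = sum(1 for word in female_words if word in text)
--
--     if male_count > female_count:
--         return '男'
--     elif female_count > male_count:
--         return '女'
--     else:
--         male_first_pos = len(text)
--         female_first_pos = len(text)
--
--         for word in male_words:
--             if word in text:
--                 pos = text.find(word)
--                 if pos < male_first_pos:
--                     male_first_pos = pos
--
--         for word in female_words:
--             if word in text:
--                 pos = text.find(word)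
--                 if pos < female_first_pos:
--                     female_first_pos = pos
--
--         if male_first_pos < female_first_pos:
--             return '男'
--         elif female_first_pos < male_first_pos:
--             return '女'
--         else:
--             return None
-- ===== SOURCE B (Python) =====
-- def _resolve_gender_conflict(text, male_words, female_words):
--     # Text-driven scan instead of per-word substring searches: walk the start
--     # positions of the text left to right, recording in a dict the first
--     # position at which each word matches; presence and earliest position for
--     # both lists are then read off that one dict.
--     words = male_words + female_words
--     first = {}
--     for i in range(len(text) + 1):
--         for w in words:
--             if w not in first and text.startswith(w, i):
--                 first[w] = i
--
--     mc = sum(1 for w in male_words if w in first)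
--     fc = sum(1 for w in female_words if w in first)
--     if mc != fc:
--         return '男' if mc > fc else '女'
--
--     mp = min((first[w] for w in male_words if w in first), default=len(text))
--     fp = min((first[w] for w in female_words if w in first), default=len(text))
--     if mp != fp:
--         return '男' if mp < fp else '女'
--     return None
-- ===== Notes on version B (the rewrite author's own statement) =====
-- stated objective: alternative
-- what changed: Replaces A's word-driven passes (a substring search per word for counting and again for first positions) by a single text-driven left-to-right scan of the start positions that fills a word->first-match-position dict ('first write wins'), from which both presence counts and earliest positions are read off; same asymptotics, slower constants in pure Python.
import Mathlib
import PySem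

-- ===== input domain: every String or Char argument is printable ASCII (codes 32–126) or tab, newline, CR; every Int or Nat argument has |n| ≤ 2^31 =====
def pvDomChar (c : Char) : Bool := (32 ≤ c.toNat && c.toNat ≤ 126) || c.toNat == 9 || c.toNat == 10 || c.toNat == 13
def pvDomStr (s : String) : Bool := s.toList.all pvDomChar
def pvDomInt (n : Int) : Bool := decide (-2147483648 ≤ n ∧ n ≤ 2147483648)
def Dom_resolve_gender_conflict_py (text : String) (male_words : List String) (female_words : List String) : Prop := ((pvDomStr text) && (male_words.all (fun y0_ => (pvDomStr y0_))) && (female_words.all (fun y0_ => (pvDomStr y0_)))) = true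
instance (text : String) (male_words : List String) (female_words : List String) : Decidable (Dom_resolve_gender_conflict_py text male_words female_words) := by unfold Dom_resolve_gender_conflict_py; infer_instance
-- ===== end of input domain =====

-- B replaces A's word-driven substring searches by one text-driven left-to-right scan
-- that fills a word -> first-match-position dict, read off for counts and positions
-- (objective: alternative decomposition; it trades A's C-level find loops for an
-- explicit position sweep, so it is not faster).

-- ===== PORT A =====
-- sum(1 for word in words if word in text)
def pvCountIn (text : String) (words : List String) : Int :=
  words.foldl (fun acc w => if PySem.Str.isIn w text then acc + 1 else acc) 0

-- the 'for word in words: if word in text: pos = text.find(word); if pos < p: p = pos' loop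
def pvFirstPos (text : String) (words : List String) (p0 : Int) : Int :=
  words.foldl (fun p w =>
    if PySem.Str.isIn w text then
      let pos := PySem.Str.find text w
      if pos < p then pos else p
    else p) p0

def resolve_gender_conflict_py (text : String) (male_words : List String) (female_words : List String) : Option String :=
  let male_count := pvCountIn text male_words
  let female_count := pvCountIn text female_words
  if male_count > female_count then some "男"
  else if female_count > male_count then some "女"
  else
    let male_first_pos := pvFirstPos text male_words (PySem.Str.len text)
    let female_first_pos := pvFirstPos text female_words (PySem.Str.len text)
    if male_first_pos < female_first_pos then some "男"
    else if female_first_pos < male_first_pos then some "女"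
    else none

-- ===== PORT B =====
-- the scan 'for i in range(len(text)+1): for w in words: if w not in first and
-- text.startswith(w, i): first[w] = i'; Python's text.startswith(w, i) is ported as a
-- prefix test on text[i:], exact because i ranges over 0..len(text) here
def pvFirstDict (text : String) (words : List String) : PySem.Dict String Int :=
  (PySem.List.pyRange 0 (PySem.Str.len text + 1) 1).foldl (fun d i =>
    words.foldl (fun d w =>
      if !(d.contains w) && PySem.Chars.startswith (text.toList.drop i.toNat) w.toList then
        d.insert w i
      else d) d)
    PySem.Dict.empty

-- sum(1 for w in ws if w in first)
def pvCountDict (first : PySem.Dict String Int) (ws : List String) : Int :=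
  ws.foldl (fun acc w => if first.contains w then acc + 1 else acc) 0

-- min((first[w] for w in ws if w in first), default=dflt); first[w] is total here
-- because the filter keeps exactly the keys present in the dict
def pvMinDict (first : PySem.Dict String Int) (ws : List String) (dflt : Int) : Int :=
  PySem.List.minD ((ws.filter (fun w => first.contains w)).map (fun w => first.getD w 0))
    (fun x => x) dflt

def resolve_gender_conflict_py_alt (text : String) (male_words : List String) (female_words : List String) : Option String :=
  let first := pvFirstDict text (male_words ++ female_words)
  let mc := pvCountDict first male_words
  let fc := pvCountDict first female_words
  if mc ≠ fc then (if mc > fc then some "男" else some "女")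
  else
    let mp := pvMinDict first male_words (PySem.Str.len text)
    let fp := pvMinDict first female_words (PySem.Str.len text)
    if mp ≠ fp then (if mp < fp then some "男" else some "女")
    else none

-- ===== PRECONDITION & SPEC =====
def Spec_resolve_gender_conflict_py (text : String) (male_words : List String) (female_words : List String) (out : Option String) : Prop := out = resolve_gender_conflict_py_alt text male_words female_words
instance (text : String) (male_words : List String) (female_words : List String) (out : Option String) : Decidable (Spec_resolve_gender_conflict_py text male_words female_words out) := by unfold Spec_resolve_gender_conflict_py; infer_instance

-- ===== CLAIM (what is proved, stated in full; the proofs are below) =====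
def Claim_equal_resolve_gender_conflict_py : Prop := ∀ (text : String) (male_words : List String) (female_words : List String), Dom_resolve_gender_conflict_py text male_words female_words → Spec_resolve_gender_conflict_py text male_words female_words (resolve_gender_conflict_py text male_words female_words)

-- ===== LEMMAS AND PROOFS =====

-- one inner pass of B's scan at position i: it inserts i exactly for the words of ws
-- that are not yet in the dict and match at i, and changes no other lookup
theorem pvInner_get? (ws : List String) (d : PySem.Dict String Int) (i : Int)
    (c : String → Bool) (w0 : String) :
    (ws.foldl (fun d w => if !(d.contains w) && c w then d.insert w i else d) d).get? w0
      = if w0 ∈ ws ∧ d.contains w0 = false ∧ c w0 = true then some i else d.get? w0 := by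
  induction ws generalizing d with
  | nil => simp
  | cons w t ih =>
    simp only [List.foldl_cons]
    by_cases hw : w0 = w
    · subst hw
      by_cases hc : d.contains w0 = false ∧ c w0 = true
      · rw [if_pos (by simp [hc.1, hc.2])]
        rw [ih]
        have hcon : (d.insert w0 i).contains w0 = true := PySem.Dict.contains_insert_self d w0 i
        rw [if_neg (by simp [hcon]), PySem.Dict.get?_insert_self,
          if_pos ⟨List.mem_cons_self, hc⟩]
      · have hguard : (!(d.contains w0) && c w0) = false := by
          cases hcb : c w0 <;> cases hdb : d.contains w0 <;> simp_all
        rw [hguard, if_neg (by simp), ih]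
        by_cases hm : w0 ∈ t ∧ d.contains w0 = false ∧ c w0 = true
        · exact absurd hm.2 hc
        · rw [if_neg hm, if_neg (fun h => hc h.2)]
    · -- the head word is a different key: whatever happens to it preserves w0's lookup
      have hrest : ∀ d' : PySem.Dict String Int, d'.get? w0 = d.get? w0 →
          (t.foldl (fun d w => if !(d.contains w) && c w then d.insert w i else d) d').get? w0
            = if w0 ∈ w :: t ∧ d.contains w0 = false ∧ c w0 = true then some i
              else d.get? w0 := by
        intro d' hd'
        rw [ih]
        have hcon : d'.contains w0 = d.contains w0 := by
          rw [PySem.Dict.contains_eq_isSome_get?, PySem.Dict.contains_eq_isSome_get?, hd']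
        rw [hcon, hd']
        by_cases hm : w0 ∈ t ∧ d.contains w0 = false ∧ c w0 = true
        · rw [if_pos hm, if_pos ⟨List.mem_cons_of_mem _ hm.1, hm.2⟩]
        · rw [if_neg hm,
            if_neg (fun h => hm ⟨(List.mem_cons.mp h.1).resolve_left hw, h.2⟩)]
      by_cases hg : (!(d.contains w) && c w) = true
      · rw [if_pos hg]
        exact hrest _ (by rw [PySem.Dict.get?_insert, if_neg hw])
      · rw [if_neg (by simpa using hg)]
        exact hrest _ rfl

-- after scanning positions 0..k-1, the dict holds exactly the words of ws whose first
-- match (= Python's text.find) lies below k, mapped to that first position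
theorem pvScan_get? (text : String) (ws : List String) (k : Nat) (w0 : String) :
    (((List.range k).map (fun j : Nat => (j : Int))).foldl (fun d i =>
        ws.foldl (fun d w =>
          if !(d.contains w) && PySem.Chars.startswith (text.toList.drop i.toNat) w.toList then
            d.insert w i
          else d) d)
      PySem.Dict.empty).get? w0
    = if w0 ∈ ws ∧ 0 ≤ PySem.Chars.find text.toList w0.toList ∧
          (PySem.Chars.find text.toList w0.toList).toNat < k
      then some (PySem.Chars.find text.toList w0.toList) else none := by
  induction k with
  | zero => simp
  | succ k ih =>
    rw [List.range_succ, List.map_append, List.foldl_append]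
    simp only [List.map_cons, List.map_nil, List.foldl_cons, List.foldl_nil]
    set f := PySem.Chars.find text.toList w0.toList with hf
    have hcont : ((((List.range k).map (fun j : Nat => (j : Int))).foldl (fun d i =>
        ws.foldl (fun d w =>
          if !(d.contains w) && PySem.Chars.startswith (text.toList.drop i.toNat) w.toList then
            d.insert w i
          else d) d) PySem.Dict.empty).contains w0)
        = (if w0 ∈ ws ∧ 0 ≤ f ∧ f.toNat < k then some f else none).isSome := by
      rw [PySem.Dict.contains_eq_isSome_get?, ih]
    rw [pvInner_get?, ih]
    simp only [Int.toNat_natCast]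
    by_cases hmem : w0 ∈ ws
    · by_cases hlt : 0 ≤ f ∧ f.toNat < k
      · -- already found: the guard 'w not in first' blocks a second write
        rw [if_pos ⟨hmem, hlt⟩] at hcont
        simp only [Option.isSome_some] at hcont
        rw [if_neg (by rintro ⟨-, hcf, -⟩; rw [hcf] at hcont; exact Bool.false_ne_true hcont)]
        rw [if_pos ⟨hmem, hlt⟩, if_pos ⟨hmem, hlt.1, by omega⟩]
      · have hnk : ¬(w0 ∈ ws ∧ 0 ≤ f ∧ f.toNat < k) := fun h => hlt h.2
        rw [if_neg hnk] at hcont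
        simp only [Option.isSome_none] at hcont
        by_cases hsw : PySem.Chars.startswith (text.toList.drop k) w0.toList = true
        · -- first match is exactly at position k
          have hpre : w0.toList <+: text.toList.drop k := (PySem.Chars.startswith_iff _ _).mp hsw
          have hf0 : 0 ≤ f := by
            rw [hf, PySem.Chars.find_nonneg_iff, ← PySem.Chars.isIn_iff_infix,
              ← PySem.Chars.exists_prefix_drop_iff_isIn]
            exact ⟨k, hpre⟩
          have hle : f.toNat ≤ k := by
            by_contra hgt
            exact (PySem.Chars.find_spec hf0).2 k (by omega) hpre
          rw [if_pos ⟨hmem, hcont, hsw⟩, if_pos ⟨hmem, hf0, by omega⟩]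
          have hk : f.toNat = k := by omega
          congr 1
          rw [← hk, Int.toNat_of_nonneg hf0]
        · have hA : ¬(w0 ∈ ws ∧
              (((List.range k).map (fun j : Nat => (j : Int))).foldl (fun d i =>
                ws.foldl (fun d w =>
                  if !(d.contains w) &&
                      PySem.Chars.startswith (text.toList.drop i.toNat) w.toList then
                    d.insert w i
                  else d) d) PySem.Dict.empty).contains w0 = false ∧
              PySem.Chars.startswith (text.toList.drop k) w0.toList = true) :=
            fun h => hsw h.2.2
          have hnk1 : ¬(w0 ∈ ws ∧ 0 ≤ f ∧ f.toNat < k + 1) := by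
            rintro ⟨-, hf0, hk1⟩
            have hk : f.toNat = k := by omega
            exact hsw ((PySem.Chars.startswith_iff _ _).mpr
              (by rw [← hk]; exact (PySem.Chars.find_spec hf0).1))
          rw [if_neg hA, if_neg hnk, if_neg hnk1]
    · rw [if_neg (fun h => hmem h.1), if_neg (fun h => hmem h.1), if_neg (fun h => hmem h.1)]

-- B's dict, characterised: lookup = Python's find, for present words of the scanned list
theorem pvFirstDict_get? (text : String) (ws : List String) (w0 : String) :
    (pvFirstDict text ws).get? w0
      = if w0 ∈ ws ∧ 0 ≤ PySem.Chars.find text.toList w0.toList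
        then some (PySem.Chars.find text.toList w0.toList) else none := by
  unfold pvFirstDict
  have hlen : PySem.Str.len text + 1 = ((text.toList.length + 1 : Nat) : Int) := by
    simp [pysem]
  rw [hlen, PySem.List.pyRange_zero_natCast, pvScan_get?]
  by_cases h : w0 ∈ ws ∧ 0 ≤ PySem.Chars.find text.toList w0.toList
  · rw [if_pos ⟨h.1, h.2, by
      have := PySem.Chars.find_le_length text.toList w0.toList
      omega⟩, if_pos h]
  · rw [if_neg (fun hc => h ⟨hc.1, hc.2.1⟩), if_neg h]

-- presence in B's dict = Python's 'word in text', for words of the scanned list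
theorem pvFirstDict_contains (text : String) (ws : List String) (w0 : String) (h : w0 ∈ ws) :
    (pvFirstDict text ws).contains w0 = PySem.Str.isIn w0 text := by
  rw [PySem.Dict.contains_eq_isSome_get?, pvFirstDict_get?]
  by_cases hin : PySem.Str.isIn w0 text = true
  · rw [if_pos ⟨h, by
      rw [PySem.Chars.find_nonneg_iff]
      exact (PySem.Str.isIn_iff_infix _ _).mp hin⟩, hin]
    rfl
  · rw [if_neg (by
      rintro ⟨-, hf⟩
      rw [PySem.Chars.find_nonneg_iff] at hf
      exact hin ((PySem.Str.isIn_iff_infix _ _).mpr hf)), Bool.eq_false_iff.mpr hin]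
    rfl

-- the counts agree
theorem pvCount_eq (text : String) (ws all : List String) (hsub : ∀ w ∈ ws, w ∈ all) :
    pvCountDict (pvFirstDict text all) ws = pvCountIn text ws := by
  unfold pvCountDict pvCountIn
  exact PySem.List.foldl_congr_mem ws _ _ 0 (fun acc w hw => by
    rw [pvFirstDict_contains text all w (hsub w hw)])

-- Python's min(…, default=d) is the running-min fold from d when d bounds the list
theorem pvMinD_eq_foldl_min (L : List Int) (d : Int) (hb : ∀ x ∈ L, x ≤ d) :
    PySem.List.minD L (fun x => x) d = L.foldl min d := by
  cases L with
  | nil => rfl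
  | cons x t =>
    rw [PySem.List.minD, PySem.List.min?_id_cons]
    simp only [Option.getD_some, List.foldl_cons]
    rw [min_eq_right (hb x (List.mem_cons_self))]

-- the first positions agree
theorem pvMin_eq (text : String) (ws all : List String) (hsub : ∀ w ∈ ws, w ∈ all) :
    pvMinDict (pvFirstDict text all) ws (PySem.Str.len text)
      = pvFirstPos text ws (PySem.Str.len text) := by
  -- A's conditional fold is a fold of min over the found words' find-values
  have hA : pvFirstPos text ws (PySem.Str.len text)
      = ((ws.filter (fun w => PySem.Str.isIn w text)).map
          (fun w => PySem.Str.find text w)).foldl min (PySem.Str.len text) := by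
    unfold pvFirstPos
    rw [PySem.List.foldl_if_eq_foldl_filter (fun w => PySem.Str.isIn w text)
      (fun p w => let pos := PySem.Str.find text w; if pos < p then pos else p) ws
      (PySem.Str.len text)]
    rw [List.foldl_map]
    exact PySem.List.foldl_congr_mem _ _ _ _ (fun p w _ => by
      simp only [min_def]
      split_ifs <;> omega)
  -- B's filtered list carries the same find-values
  have hfilter : ws.filter (fun w => (pvFirstDict text all).contains w)
      = ws.filter (fun w => PySem.Str.isIn w text) := by
    apply List.filter_congr
    intro w hw
    rw [pvFirstDict_contains text all w (hsub w hw)]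
  have hmap : (ws.filter (fun w => (pvFirstDict text all).contains w)).map
        (fun w => (pvFirstDict text all).getD w 0)
      = (ws.filter (fun w => PySem.Str.isIn w text)).map (fun w => PySem.Str.find text w) := by
    rw [hfilter]
    apply List.map_congr_left
    intro w hw
    have hw' := List.mem_filter.mp hw
    have hin : 0 ≤ PySem.Chars.find text.toList w.toList := by
      rw [PySem.Chars.find_nonneg_iff]
      exact (PySem.Str.isIn_iff_infix _ _).mp hw'.2
    rw [PySem.Dict.getD_eq_get?_getD, pvFirstDict_get?,
      if_pos ⟨hsub w hw'.1, hin⟩]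
    simp [pysem]
  have hbound : ∀ x ∈ (ws.filter (fun w => PySem.Str.isIn w text)).map
      (fun w => PySem.Str.find text w), x ≤ PySem.Str.len text := by
    intro x hx
    obtain ⟨w, -, rfl⟩ := List.mem_map.mp hx
    have h1 := PySem.Chars.find_le_length text.toList w.toList
    have h2 : PySem.Str.find text w = PySem.Chars.find text.toList w.toList := by
      simp [pysem]
    have h3 : PySem.Str.len text = ((text.toList.length : Nat) : Int) := by
      simp [pysem]
    rw [h2, h3]
    exact h1
  unfold pvMinDict
  rw [hmap, hA]
  exact pvMinD_eq_foldl_min _ _ hbound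

-- ===== VERDICT (by name: the statement is the Claim_ definition above) =====
theorem resolve_gender_conflict_py_spec : Claim_equal_resolve_gender_conflict_py := by
  intro text mws fws _
  unfold Spec_resolve_gender_conflict_py
  have hm : ∀ w ∈ mws, w ∈ mws ++ fws := fun w hw => List.mem_append_left _ hw
  have hf : ∀ w ∈ fws, w ∈ mws ++ fws := fun w hw => List.mem_append_right _ hw
  simp only [resolve_gender_conflict_py, resolve_gender_conflict_py_alt,
    pvCount_eq text mws _ hm, pvCount_eq text fws _ hf,
    pvMin_eq text mws _ hm, pvMin_eq text fws _ hf]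
  set mc := pvCountIn text mws
  set fc := pvCountIn text fws
  set mp := pvFirstPos text mws (PySem.Str.len text)
  set fp := pvFirstPos text fws (PySem.Str.len text)
  split_ifs <;> first | rfl | omega
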